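-- pv_equiv track=rewrite | github.com/tanmoy162111/Optimus | backend/training/feature_extractor.py | _max_consecutive_special_chars
-- ===== SOURCE A (Python) =====
-- def _max_consecutive_special_chars(text: str) -> int:
--     """Count maximum consecutive special characters"""
--     max_count = 0
--     current_count = 0
--
--     for char in text:
--         if not char.isalnum() and char != ' ':
--             current_count += 1
--             max_count = max(max_count, current_count)
--         else:
--             current_count = 0
--
--     return max_count
-- ===== SOURCE B (Python) =====
-- def _max_consecutive_special_chars(text: str) -> int:
--     """Count maximum consecutive special characters (run-scanner version)."""
--     best = 0
--     i = 0
--     n = len(text)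
--     while i < n:
--         if not text[i].isalnum() and text[i] != ' ':
--             j = i + 1
--             while j < n and not text[j].isalnum() and text[j] != ' ':
--                 j += 1
--             if j - i > best:
--                 best = j - i
--             i = j
--         else:
--             i += 1
--     return best
-- ===== Notes on version B (the rewrite author's own statement) =====
-- stated objective: alternative
-- what changed: Replaces the per-character running/max counter pair with an outer loop over maximal special runs: an inner scan finds the end of each run and its whole length is compared to the best at once.
import Mathlib
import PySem

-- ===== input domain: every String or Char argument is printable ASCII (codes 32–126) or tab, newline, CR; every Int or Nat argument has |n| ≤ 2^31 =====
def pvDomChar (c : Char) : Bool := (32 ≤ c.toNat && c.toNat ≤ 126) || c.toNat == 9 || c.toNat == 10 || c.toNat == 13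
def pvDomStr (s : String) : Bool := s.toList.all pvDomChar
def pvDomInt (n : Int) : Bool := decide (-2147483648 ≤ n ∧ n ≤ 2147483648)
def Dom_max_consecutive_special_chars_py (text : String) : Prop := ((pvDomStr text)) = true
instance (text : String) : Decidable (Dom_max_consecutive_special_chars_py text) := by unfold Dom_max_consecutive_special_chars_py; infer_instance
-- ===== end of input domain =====

-- B replaces A's per-character running/max counter pair with an outer loop over maximal
-- special runs (inner scan finds each run's end, whole run length compared to best at once);
-- objective: alternative decomposition, same O(n) cost.

-- `not char.isalnum() and char != ' '` — shared predicate of both Pythons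
def pvSpecial (c : Char) : Bool := !(PySem.Chars.isalnum c) && c != ' '

-- ===== PORT A =====
-- the loop body of A: state (max_count, current_count)
def pvStepA (st : Int × Int) (c : Char) : Int × Int :=
  if pvSpecial c then (max st.1 (st.2 + 1), st.2 + 1) else (st.1, 0)

def max_consecutive_special_chars_py (text : String) : Int :=
  (text.toList.foldl pvStepA ((0 : Int), (0 : Int))).1

-- ===== PORT B =====
-- inner `while j < n and special(text[j]): j += 1` on the remaining suffix:
-- returns (run length j - i, suffix from j)
def pvRun : List Char → Nat × List Char
  | [] => (0, [])
  | c :: t => if pvSpecial c then ((pvRun t).1 + 1, (pvRun t).2) else (0, c :: t)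

theorem pvRun_snd_length (l : List Char) : (pvRun l).2.length ≤ l.length := by
  induction l with
  | nil => simp [pvRun]
  | cons c t ih =>
    by_cases h : pvSpecial c <;> simp [pvRun, h]
    omega

-- outer `while i < n` of B, on the remaining suffix `text[i:]`
def pvScan (best : Int) : List Char → Int
  | [] => best
  | c :: t =>
    if h : pvSpecial c then
      pvScan (if ((pvRun (c :: t)).1 : Int) > best then ((pvRun (c :: t)).1 : Int) else best)
        (pvRun (c :: t)).2
    else pvScan best t
termination_by l => l.length
decreasing_by
  · simp only [pvRun, h, if_pos]
    have := pvRun_snd_length t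
    simp only [List.length_cons]; omega
  · simp

def max_consecutive_special_chars_py_alt (text : String) : Int :=
  pvScan 0 text.toList

-- ===== PRECONDITION & SPEC =====
def Spec_max_consecutive_special_chars_py (text : String) (out : Int) : Prop := out = max_consecutive_special_chars_py_alt text
instance (text : String) (out : Int) : Decidable (Spec_max_consecutive_special_chars_py text out) := by unfold Spec_max_consecutive_special_chars_py; infer_instance

-- ===== CLAIM (what is proved, stated in full; the proofs are below) =====
def Claim_equal_max_consecutive_special_chars_py : Prop := ∀ (text : String), Dom_max_consecutive_special_chars_py text → Spec_max_consecutive_special_chars_py text (max_consecutive_special_chars_py text)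

-- ===== LEMMAS AND PROOFS =====

-- canonical value: best special-run length, with the current run already `cur` long
def pvH (cur : Int) : List Char → Int
  | [] => 0
  | c :: t => if pvSpecial c then max (cur + 1) (pvH (cur + 1) t) else pvH 0 t

theorem foldA_eq (l : List Char) : ∀ (mx cur : Int), 0 ≤ mx →
    (l.foldl pvStepA (mx, cur)).1 = max mx (pvH cur l) := by
  induction l with
  | nil =>
    intro mx cur hmx
    simp [pvH, max_eq_left hmx]
  | cons c t ih =>
    intro mx cur hmx
    by_cases h : pvSpecial c
    · simp only [List.foldl_cons, pvStepA, pvH, h, if_pos]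
      rw [ih (max mx (cur + 1)) (cur + 1) (le_trans hmx (le_max_left _ _)), max_assoc]
    · simp only [List.foldl_cons, pvStepA, pvH, h, if_neg, Bool.false_eq_true,
        not_false_iff, if_false]
      exact ih mx 0 hmx

theorem pvH_run (c : Char) (t : List Char) (cur : Int) (hc : pvSpecial c = true) :
    pvH cur (c :: t) = max (cur + ((pvRun (c :: t)).1 : Int)) (pvH 0 (pvRun (c :: t)).2) := by
  induction t generalizing cur c with
  | nil =>
    simp [pvH, pvRun, hc]
  | cons d t' ih =>
    have hstep : pvH cur (c :: d :: t') = max (cur + 1) (pvH (cur + 1) (d :: t')) := by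
      conv_lhs => rw [pvH]
      rw [if_pos hc]
    have hrun : pvRun (c :: d :: t') = ((pvRun (d :: t')).1 + 1, (pvRun (d :: t')).2) := by
      conv_lhs => rw [pvRun]
      rw [if_pos hc]
    by_cases hd : pvSpecial d
    · have hk : 1 ≤ (pvRun (d :: t')).1 := by
        simp [pvRun, hd]
      rw [hstep, ih d (cur + 1) hd, hrun, ← max_assoc,
        max_eq_right (b := cur + 1 + ((pvRun (d :: t')).1 : Int)) (by omega)]
      congr 1
      push_cast
      ring
    · have hrun2 : pvRun (d :: t') = (0, d :: t') := by
        conv_lhs => rw [pvRun]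
        rw [if_neg (by simp [hd])]
      have hH : pvH (cur + 1) (d :: t') = pvH 0 (d :: t') := by
        conv_lhs => rw [pvH]
        conv_rhs => rw [pvH]
        rw [if_neg (by simp [hd]), if_neg (by simp [hd])]
      rw [hstep, hH, hrun, hrun2]
      simp

theorem pvScan_eq (n : Nat) : ∀ (l : List Char), l.length ≤ n → ∀ (best : Int), 0 ≤ best →
    pvScan best l = max best (pvH 0 l) := by
  induction n with
  | zero =>
    intro l hl best hb
    have : l = [] := by cases l <;> simp_all
    subst this
    simp [pvScan, pvH, max_eq_left hb]
  | succ n ih =>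
    intro l hl best hb
    cases l with
    | nil => simp [pvScan, pvH, max_eq_left hb]
    | cons c t =>
      by_cases h : pvSpecial c
      · rw [pvScan, dif_pos h]
        have hif : (if ((pvRun (c :: t)).1 : Int) > best then ((pvRun (c :: t)).1 : Int) else best)
            = max best ((pvRun (c :: t)).1 : Int) := by
          rw [max_def]; split_ifs <;> omega
        have hlen : (pvRun (c :: t)).2.length ≤ n := by
          have h1 := pvRun_snd_length t
          have h2 : (pvRun (c :: t)).2 = (pvRun t).2 := by
            conv_lhs => rw [pvRun]
            rw [if_pos h]
          simp only [List.length_cons] at hl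
          rw [h2]; omega
        rw [hif, ih _ hlen _ (le_trans hb (le_max_left _ _)),
          pvH_run c t 0 h, zero_add, max_assoc]
      · rw [pvScan, dif_neg h]
        have hH : pvH 0 (c :: t) = pvH 0 t := by
          conv_lhs => rw [pvH]
          rw [if_neg (by simp [h])]
        simp only [List.length_cons] at hl
        rw [hH, ih t (by omega) best hb]

-- ===== VERDICT (by name: the statement is the Claim_ definition above) =====
theorem max_consecutive_special_chars_py_spec : Claim_equal_max_consecutive_special_chars_py := by
  intro text _
  unfold Spec_max_consecutive_special_chars_py max_consecutive_special_chars_py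
    max_consecutive_special_chars_py_alt
  rw [foldA_eq _ 0 0 le_rfl, pvScan_eq text.toList.length _ le_rfl 0 le_rfl]
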